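-- pv_equiv track=rewrite | github.com/adcret/PMP | matlab_env/Lib/site-packages/jaxlib/mosaic/python/infer_memref_layout.py | _tiling_factor
-- ===== SOURCE A (Python) =====
-- def _tiling_factor(
--     num_128s: int, hardware_generation: int, bitwidth: int
-- ) -> int:
--   """Returns the number of 128-element groups in a tile.
--
--   Arguments:
--     num_128s: A number of 128-element groups in the full operand.
--     hardware_generation: An integer indicating the target TPU generation.
--     bitwidth: The bitwidth of the element type of the operand.
--   """
--   assert bitwidth.bit_count() == 1 and (4 <= bitwidth <= 32)
--   packing = 32 // bitwidth
--   min_tiling = (1 + (hardware_generation < 4)) * packing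
--   max_tiling = 8
--   tiling = min_tiling
--   while tiling < min(num_128s, max_tiling):
--     tiling *= 2
--   return tiling
-- ===== SOURCE B (Python) =====
-- def _tiling_factor(
--     num_128s: int, hardware_generation: int, bitwidth: int
-- ) -> int:
--   """Closed-form next-power-of-two instead of A's doubling loop."""
--   assert bitwidth.bit_count() == 1 and (4 <= bitwidth <= 32)
--   packing = 32 // bitwidth
--   min_tiling = (1 + (hardware_generation < 4)) * packing
--   cap = min(num_128s, 8)
--   if cap <= min_tiling:
--     return min_tiling
--   return max(min_tiling, 1 << (cap - 1).bit_length())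
-- ===== Notes on version B (the rewrite author's own statement) =====
-- stated objective: simpler
-- what changed: Replaces the bounded doubling while-loop with a closed-form next-power-of-two formula: cap = min(num_128s, 8); return min_tiling if cap <= min_tiling, else max(min_tiling, 1 << (cap-1).bit_length()).
import Mathlib
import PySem

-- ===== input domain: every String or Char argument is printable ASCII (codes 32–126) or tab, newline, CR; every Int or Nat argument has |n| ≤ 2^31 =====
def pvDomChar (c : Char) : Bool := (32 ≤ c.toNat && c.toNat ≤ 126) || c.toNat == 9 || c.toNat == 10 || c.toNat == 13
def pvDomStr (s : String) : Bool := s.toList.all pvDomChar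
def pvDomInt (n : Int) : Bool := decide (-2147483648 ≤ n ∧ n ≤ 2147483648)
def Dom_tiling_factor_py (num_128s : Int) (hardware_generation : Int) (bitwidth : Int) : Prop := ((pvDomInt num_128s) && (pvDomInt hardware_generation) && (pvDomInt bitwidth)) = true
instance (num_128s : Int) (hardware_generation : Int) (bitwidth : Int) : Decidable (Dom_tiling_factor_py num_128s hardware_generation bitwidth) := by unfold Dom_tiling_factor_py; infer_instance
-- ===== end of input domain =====

-- B replaces A's bounded doubling while-loop with a closed-form next-power-of-two formula (simpler).


-- ===== PORT A =====
-- the while-loop; fuel only makes it total (inside Pre_ min_tiling ≥ 1 and the bound is ≤ 8,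
-- so at most 3 iterations run and fuel 8 is never exhausted)
def tfLoopA (fuel : Nat) (num_128s max_tiling tiling : Int) : Int :=
  match fuel with
  | 0 => tiling
  | f + 1 =>
    if tiling < min num_128s max_tiling then tfLoopA f num_128s max_tiling (tiling * 2)
    else tiling

def tiling_factor_py (num_128s : Int) (hardware_generation : Int) (bitwidth : Int) : Int :=
  -- the assert is Pre_tiling_factor_py
  let packing := PySem.Int.floordiv 32 bitwidth
  let min_tiling := (1 + (if hardware_generation < 4 then (1 : Int) else 0)) * packing
  let max_tiling : Int := 8
  tfLoopA 8 num_128s max_tiling min_tiling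

-- ===== PORT B =====
def tiling_factor_py_alt (num_128s : Int) (hardware_generation : Int) (bitwidth : Int) : Int :=
  let packing := PySem.Int.floordiv 32 bitwidth
  let min_tiling := (1 + (if hardware_generation < 4 then (1 : Int) else 0)) * packing
  let cap := min num_128s 8
  if cap ≤ min_tiling then min_tiling
  else max min_tiling ((2 : Int) ^ PySem.Int.bitLength (cap - 1))  -- 1 << k = 2^k

-- ===== PRECONDITION & SPEC =====
-- Pre_ excludes exactly the inputs on which A's assert fails (AssertionError):
-- bitwidth must be a power of two with 4 <= bitwidth <= 32, i.e. 4, 8, 16 or 32.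
def Pre_tiling_factor_py (num_128s : Int) (hardware_generation : Int) (bitwidth : Int) : Prop :=
  bitwidth = 4 ∨ bitwidth = 8 ∨ bitwidth = 16 ∨ bitwidth = 32
instance (num_128s : Int) (hardware_generation : Int) (bitwidth : Int) : Decidable (Pre_tiling_factor_py num_128s hardware_generation bitwidth) := by unfold Pre_tiling_factor_py; infer_instance

def pvWitness_tiling_factor_py : Int × Int × Int := (9, 3, 8)

def Spec_tiling_factor_py (num_128s : Int) (hardware_generation : Int) (bitwidth : Int) (out : Int) : Prop := out = tiling_factor_py_alt num_128s hardware_generation bitwidth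
instance (num_128s : Int) (hardware_generation : Int) (bitwidth : Int) (out : Int) : Decidable (Spec_tiling_factor_py num_128s hardware_generation bitwidth out) := by unfold Spec_tiling_factor_py; infer_instance

-- ===== CLAIM (what is proved, stated in full; the proofs are below) =====
def Claim_equal_tiling_factor_py : Prop := ∀ (num_128s : Int) (hardware_generation : Int) (bitwidth : Int), Dom_tiling_factor_py num_128s hardware_generation bitwidth → Pre_tiling_factor_py num_128s hardware_generation bitwidth → Spec_tiling_factor_py num_128s hardware_generation bitwidth (tiling_factor_py num_128s hardware_generation bitwidth)

-- ===== LEMMAS AND PROOFS =====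

-- the loop only depends on num_128s through min num_128s 8
lemma tfLoopA_min (f : Nat) (n t : Int) : tfLoopA f n 8 t = tfLoopA f (min n 8) 8 t := by
  induction f generalizing t with
  | zero => rfl
  | succ f ih =>
    simp only [tfLoopA]
    have : min (min n 8) 8 = min n 8 := by omega
    rw [this]
    split <;> simp [ih]

-- main case analysis at a fixed cap = min num_128s 8 and min_tiling m
lemma core (m c : Int) (hm : m = 1 ∨ m = 2 ∨ m = 4 ∨ m = 8 ∨ m = 16) (hc : c ≤ 8) :
    tfLoopA 8 c 8 m =
      (if c ≤ m then m else max m ((2 : Int) ^ PySem.Int.bitLength (c - 1))) := by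
  by_cases hle : c ≤ m
  · have : ¬ m < min c 8 := by omega
    simp [tfLoopA, this, hle]
  · have h1 : (1:Int) ≤ m := by omega
    have hgt : m < c := by omega
    have hcl : 2 ≤ c := by omega
    simp only [hle, if_false]
    interval_cases c <;> rcases hm with rfl | rfl | rfl | rfl | rfl <;> (try omega) <;> decide

theorem tiling_factor_py_spec_aux :
    ∀ (num_128s hardware_generation bitwidth : Int),
      Pre_tiling_factor_py num_128s hardware_generation bitwidth →
      tiling_factor_py num_128s hardware_generation bitwidth =
        tiling_factor_py_alt num_128s hardware_generation bitwidth := by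
  intro n hg bw hbw
  unfold tiling_factor_py tiling_factor_py_alt
  rw [tfLoopA_min]
  have hc : min n 8 ≤ 8 := by omega
  rcases hbw with rfl | rfl | rfl | rfl <;> by_cases hhg : hg < 4 <;>
    simp only [hhg, if_true, if_false] <;>
    rw [core _ _ (by decide) hc]

-- ===== VERDICT (by name: the statement is the Claim_ definition above) =====
theorem tiling_factor_py_spec : Claim_equal_tiling_factor_py := by
  intro n hg bw _ hpre
  exact tiling_factor_py_spec_aux n hg bw hpre
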